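-- pv_equiv track=rewrite | github.com/Rachel0777/-meme- | streamlit/vit_mask_pre.py | merge_nested_boxes
-- ===== SOURCE A (Python) =====
-- def merge_nested_boxes(boxes):
--     if len(boxes) <= 1:
--         return boxes
--
--     # 按面积从大到小排序（优先处理大框）
--     sorted_boxes = sorted(boxes, key=lambda b: (b[2]-b[0])*(b[3]-b[1]), reverse=True)
--
--     merged_boxes = []
--     for i, box in enumerate(sorted_boxes):
--         x1, y1, x2, y2 = box
--         is_nested = False
--
--         # 检查是否被已合并的大框包含
--         for merged in merged_boxes:
--             mx1, my1, mx2, my2 = merged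
--             if x1 >= mx1 and y1 >= my1 and x2 <= mx2 and y2 <= my2:
--                 is_nested = True
--                 break
--
--         # 如果不是嵌套框则保留
--         if not is_nested:
--             merged_boxes.append(box)
--
--     return merged_boxes
-- ===== SOURCE B (Python) =====
-- def merge_nested_boxes(boxes):
--     # Alternative algorithm: no sort; repeatedly select the largest-area box
--     # (first one on ties, like Python's max), keep it, and purge every box it
--     # contains (including itself) from the pool.
--     result = []
--     remaining = list(boxes)
--     while remaining:
--         big = max(remaining, key=lambda b: (b[2] - b[0]) * (b[3] - b[1]))
--         result.append(big)
--         remaining = [b for b in remaining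
--                      if not (b[0] >= big[0] and b[1] >= big[1]
--                              and b[2] <= big[2] and b[3] <= big[3])]
--     return result
-- ===== Notes on version B (the rewrite author's own statement) =====
-- stated objective: alternative
-- what changed: A sorts by area descending and scans each box against the growing kept-list; B never sorts: it repeatedly selects the first largest-area box of the remaining pool (Python max) and eagerly purges every box that box contains before the next selection.
import Mathlib
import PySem

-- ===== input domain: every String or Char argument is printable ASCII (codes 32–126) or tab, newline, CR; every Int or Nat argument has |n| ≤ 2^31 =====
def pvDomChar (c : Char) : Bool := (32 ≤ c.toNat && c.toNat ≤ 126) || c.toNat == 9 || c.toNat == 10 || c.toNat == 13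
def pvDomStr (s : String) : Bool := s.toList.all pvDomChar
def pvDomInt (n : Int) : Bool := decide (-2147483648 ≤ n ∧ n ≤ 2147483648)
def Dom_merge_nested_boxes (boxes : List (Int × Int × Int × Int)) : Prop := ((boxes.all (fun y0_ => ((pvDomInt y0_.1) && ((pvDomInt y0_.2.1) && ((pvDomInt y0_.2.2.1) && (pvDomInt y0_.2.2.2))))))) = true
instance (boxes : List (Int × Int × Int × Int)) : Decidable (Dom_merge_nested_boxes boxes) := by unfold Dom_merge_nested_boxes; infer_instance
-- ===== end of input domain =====

-- B replaces A's sort-then-scan-against-the-kept-list by repeated selection of the first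
-- largest-area box with eager purging of the boxes it contains (objective: alternative algorithm).

-- shared helpers: the area key and the containment test both Pythons write inline
def pvArea (b : Int × Int × Int × Int) : Int := (b.2.2.1 - b.1) * (b.2.2.2 - b.2.1)

def pvInside (m b : Int × Int × Int × Int) : Bool :=
  b.1 ≥ m.1 && b.2.1 ≥ m.2.1 && b.2.2.1 ≤ m.2.2.1 && b.2.2.2 ≤ m.2.2.2

-- ===== PORT A =====
-- A's inner 'for merged in merged_boxes: … break' loop
def pvIsNested (merged_boxes : List (Int × Int × Int × Int)) (box : Int × Int × Int × Int) : Bool :=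
  match merged_boxes with
  | [] => false
  | merged :: rest => if pvInside merged box then true else pvIsNested rest box

def merge_nested_boxes (boxes : List (Int × Int × Int × Int)) : List (Int × Int × Int × Int) :=
  if boxes.length ≤ 1 then boxes
  else
    let sorted_boxes := PySem.List.sorted boxes pvArea true
    sorted_boxes.foldl
      (fun merged_boxes box =>
        if pvIsNested merged_boxes box then merged_boxes else merged_boxes ++ [box])
      []

-- ===== PORT B =====
-- termination helpers, cited by the port's decreasing_by
theorem pvInside_refl (b : Int × Int × Int × Int) : pvInside b b = true := by
  simp [pvInside]

theorem pvFilter_len_lt (p : (Int × Int × Int × Int) → Bool) (l : List (Int × Int × Int × Int))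
    (x : Int × Int × Int × Int) (hx : x ∈ l) (hp : p x = false) :
    (l.filter p).length < l.length := by
  induction l with
  | nil => cases hx
  | cons a t ih =>
    simp only [List.filter_cons]
    rcases List.mem_cons.mp hx with rfl | hm
    · simp [hp]
      exact List.length_filter_le _ t
    · split
      · simpa using ih hm
      · exact Nat.lt_succ_of_le (Nat.le_of_lt (ih hm))

-- B's 'while remaining:' loop: pick the first largest-area box (Python max), purge what it contains
def pvSelectLoop (remaining result : List (Int × Int × Int × Int)) : List (Int × Int × Int × Int) :=
  match h : PySem.List.max? remaining pvArea with
  | none => result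
  | some big =>
      pvSelectLoop (remaining.filter (fun b => !(pvInside big b))) (result ++ [big])
termination_by remaining.length
decreasing_by
  simp only [List.unattach_filter, List.unattach_attach]
  exact pvFilter_len_lt (fun b => !(pvInside big b)) remaining big (PySem.List.max?_mem h)
    (by simp [pvInside_refl])

def merge_nested_boxes_alt (boxes : List (Int × Int × Int × Int)) : List (Int × Int × Int × Int) :=
  pvSelectLoop boxes []

-- ===== PRECONDITION & SPEC =====
def Spec_merge_nested_boxes (boxes : List (Int × Int × Int × Int)) (out : List (Int × Int × Int × Int)) : Prop := out = merge_nested_boxes_alt boxes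
instance (boxes : List (Int × Int × Int × Int)) (out : List (Int × Int × Int × Int)) : Decidable (Spec_merge_nested_boxes boxes out) := by unfold Spec_merge_nested_boxes; infer_instance

-- ===== CLAIM (what is proved, stated in full; the proofs are below) =====
def Claim_equal_merge_nested_boxes : Prop := ∀ (boxes : List (Int × Int × Int × Int)), Dom_merge_nested_boxes boxes → Spec_merge_nested_boxes boxes (merge_nested_boxes boxes)

-- ===== LEMMAS AND PROOFS =====

-- head of an insertBy step (no sortedness needed)
theorem pvInsertBy_head? (before : (Int × Int × Int × Int) → (Int × Int × Int × Int) → Bool)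
    (x : Int × Int × Int × Int) (l : List (Int × Int × Int × Int)) :
    (PySem.List.insertBy before x l).head? =
      some (match l.head? with
            | none => x
            | some y => if before x y then x else y) := by
  cases l with
  | nil => simp [PySem.List.insertBy]
  | cons y ys =>
    by_cases h : before x y = true <;> simp [PySem.List.insertBy, h]

-- head of the stable reverse-sort is the first maximal element (Python's max)
theorem pvMax?_cons_cons (y x : Int × Int × Int × Int) (t : List (Int × Int × Int × Int)) :
    PySem.List.max? (y :: x :: t) pvArea =
      PySem.List.max? ((if pvArea y < pvArea x then x else y) :: t) pvArea := by
  by_cases h : pvArea y < pvArea x <;> simp [PySem.List.max?, h]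

theorem pvHead_sorted_eq_max? (xs : List (Int × Int × Int × Int)) :
    (PySem.List.sorted xs pvArea true).head? = PySem.List.max? xs pvArea := by
  suffices H : ∀ (xs acc : List (Int × Int × Int × Int)),
      (List.foldl (fun acc x => PySem.List.insertBy (fun a b => decide (pvArea b < pvArea a)) x acc) acc xs).head? =
      PySem.List.max? (acc.head?.toList ++ xs) pvArea by
    simpa [PySem.List.sorted] using H xs []
  intro xs
  induction xs with
  | nil =>
    intro acc
    cases acc with
    | nil => rfl
    | cons y ys => simp [PySem.List.max?]
  | cons x t ih =>
    intro acc
    simp only [List.foldl_cons]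
    rw [ih]
    cases acc with
    | nil => simp [PySem.List.insertBy]
    | cons y ys =>
      rw [pvInsertBy_head?]
      simp only [List.head?_cons, Option.toList_some, List.cons_append, List.nil_append]
      rw [pvMax?_cons_cons]
      by_cases h : pvArea y < pvArea x <;> simp [h]

-- inserting before everything puts x at the head
theorem pvInsertBy_all_true (before : (Int × Int × Int × Int) → (Int × Int × Int × Int) → Bool)
    (x : Int × Int × Int × Int) (l : List (Int × Int × Int × Int))
    (h : ∀ z ∈ l, before x z = true) :
    PySem.List.insertBy before x l = x :: l := by
  cases l with
  | nil => simp [PySem.List.insertBy]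
  | cons y ys => simp [PySem.List.insertBy, h y (by simp)]

-- insertBy preserves reverse-sortedness
theorem pvInsertBy_pairwise (x : Int × Int × Int × Int) :
    ∀ l : List (Int × Int × Int × Int), l.Pairwise (fun a b => pvArea b ≤ pvArea a) →
    (PySem.List.insertBy (fun a b => decide (pvArea b < pvArea a)) x l).Pairwise
      (fun a b => pvArea b ≤ pvArea a) := by
  intro l
  induction l with
  | nil => intro _; simp [PySem.List.insertBy]
  | cons y ys ih =>
    intro hl
    rcases List.pairwise_cons.mp hl with ⟨hy, hys⟩
    by_cases h : pvArea y < pvArea x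
    · simp only [PySem.List.insertBy, h, decide_true, if_true]
      refine List.pairwise_cons.mpr ⟨?_, hl⟩
      intro z hz
      rcases List.mem_cons.mp hz with rfl | hz
      · exact le_of_lt h
      · exact le_trans (hy z hz) (le_of_lt h)
    · simp only [PySem.List.insertBy, h, decide_false, Bool.false_eq_true, if_false]
      refine List.pairwise_cons.mpr ⟨?_, ih hys⟩
      intro z hz
      rcases (PySem.List.mem_insertBy _ _ _ _).mp hz with rfl | hz
      · exact le_of_not_gt h
      · exact hy z hz

-- filter commutes with one insertBy step into a reverse-sorted list
theorem pvFilter_insertBy (p : (Int × Int × Int × Int) → Bool) (x : Int × Int × Int × Int) :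
    ∀ l : List (Int × Int × Int × Int), l.Pairwise (fun a b => pvArea b ≤ pvArea a) →
    (PySem.List.insertBy (fun a b => decide (pvArea b < pvArea a)) x l).filter p =
      if p x then PySem.List.insertBy (fun a b => decide (pvArea b < pvArea a)) x (l.filter p)
      else l.filter p := by
  intro l
  induction l with
  | nil =>
    intro _
    cases h : p x <;> simp [PySem.List.insertBy, List.filter, h]
  | cons y ys ih =>
    intro hl
    rcases List.pairwise_cons.mp hl with ⟨hy, hys⟩
    by_cases hxy : pvArea y < pvArea x
    · simp only [PySem.List.insertBy, hxy, decide_true, if_true]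
      cases hpx : p x
      · simp [List.filter_cons, hpx]
      · cases hpy : p y
        · -- y dropped: x still goes in front of every survivor of ys
          have hall : ∀ z ∈ ys.filter p,
              (fun a b => decide (pvArea b < pvArea a)) x z = true := by
            intro z hz
            have hzys : z ∈ ys := List.mem_of_mem_filter hz
            exact decide_eq_true (lt_of_le_of_lt (hy z hzys) hxy)
          simp only [List.filter_cons, hpx, hpy, if_true, Bool.false_eq_true, if_false]
          rw [pvInsertBy_all_true _ _ _ hall]
        · simp [hpx, hpy, PySem.List.insertBy, hxy]
    · simp only [PySem.List.insertBy, hxy, decide_false, Bool.false_eq_true, if_false]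
      cases hpx : p x
      · cases hpy : p y <;> simp_all
      · cases hpy : p y
        · simp_all
        · simp_all [PySem.List.insertBy]

-- filter commutes with the whole stable reverse-sort
theorem pvFilter_sorted (p : (Int × Int × Int × Int) → Bool) (xs : List (Int × Int × Int × Int)) :
    (PySem.List.sorted xs pvArea true).filter p = PySem.List.sorted (xs.filter p) pvArea true := by
  suffices H : ∀ (xs acc : List (Int × Int × Int × Int)),
      acc.Pairwise (fun a b => pvArea b ≤ pvArea a) →
      (List.foldl (fun acc x => PySem.List.insertBy (fun a b => decide (pvArea b < pvArea a)) x acc) acc xs).filter p =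
      List.foldl (fun acc x => PySem.List.insertBy (fun a b => decide (pvArea b < pvArea a)) x acc) (acc.filter p) (xs.filter p) by
    simpa [PySem.List.sorted] using H xs [] (by simp)
  intro xs
  induction xs with
  | nil => intro acc _; rfl
  | cons x t ih =>
    intro acc hacc
    simp only [List.foldl_cons, List.filter_cons]
    rw [ih _ (pvInsertBy_pairwise x acc hacc), pvFilter_insertBy p x acc hacc]
    cases hpx : p x <;> simp

-- A's nested test over an appended kept list
theorem pvIsNested_append (l1 l2 : List (Int × Int × Int × Int)) (z : Int × Int × Int × Int) :
    pvIsNested (l1 ++ l2) z = (pvIsNested l1 z || pvIsNested l2 z) := by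
  induction l1 with
  | nil => simp [pvIsNested]
  | cons m rest ih => by_cases h : pvInside m z = true <;> simp [pvIsNested, h, ih]

theorem pvIsNested_of_mem (acc : List (Int × Int × Int × Int)) (big z : Int × Int × Int × Int)
    (hmem : big ∈ acc) (h : pvInside big z = true) : pvIsNested acc z = true := by
  induction acc with
  | nil => cases hmem
  | cons m rest ih =>
    rcases List.mem_cons.mp hmem with rfl | hm
    · simp [pvIsNested, h]
    · by_cases hmz : pvInside m z = true <;> simp [pvIsNested, hmz, ih hm]

-- boxes contained in a kept box are skipped by A's fold without changing the accumulator
theorem pvSkip (big : Int × Int × Int × Int) :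
    ∀ (t acc : List (Int × Int × Int × Int)), big ∈ acc →
    t.foldl (fun merged box => if pvIsNested merged box then merged else merged ++ [box]) acc =
      (t.filter (fun z => !(pvInside big z))).foldl
        (fun merged box => if pvIsNested merged box then merged else merged ++ [box]) acc := by
  intro t
  induction t with
  | nil => intro acc _; rfl
  | cons z rest ih =>
    intro acc hmem
    simp only [List.foldl_cons, List.filter_cons]
    by_cases hz : pvInside big z = true
    · rw [if_pos (pvIsNested_of_mem acc big z hmem hz)]
      simp only [hz, Bool.not_true, Bool.false_eq_true, if_false]
      exact ih acc hmem
    · simp only [Bool.eq_false_iff.mpr hz, Bool.not_false, if_true, List.foldl_cons]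
      by_cases hn : pvIsNested acc z = true
      · rw [if_pos hn]
        exact ih acc hmem
      · rw [if_neg hn]
        exact ih (acc ++ [z]) (List.mem_append_left _ hmem)

-- B's loop computes A's fold over the sorted remaining list
theorem pvSelectLoop_eq_foldA : ∀ (n : Nat) (remaining result : List (Int × Int × Int × Int)),
    remaining.length ≤ n →
    (∀ z ∈ remaining, pvIsNested result z = false) →
    pvSelectLoop remaining result =
      (PySem.List.sorted remaining pvArea true).foldl
        (fun merged box => if pvIsNested merged box then merged else merged ++ [box]) result := by
  intro n
  induction n with
  | zero =>
    intro remaining result h _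
    have : remaining = [] := List.eq_nil_of_length_eq_zero (Nat.le_zero.mp h)
    subst this
    simp [pvSelectLoop, PySem.List.max?, PySem.List.sorted]
  | succ n ih =>
    intro remaining result hlen hinv
    rw [pvSelectLoop.eq_def]
    split
    · rename_i heq
      have : remaining = [] := (PySem.List.max?_eq_none_iff _ _).mp heq
      subst this
      simp [PySem.List.sorted]
    · rename_i big heq
      have hmem : big ∈ remaining := PySem.List.max?_mem heq
      -- the new remaining is strictly shorter
      have hlt : (remaining.filter (fun b => !(pvInside big b))).length < remaining.length :=
        pvFilter_len_lt _ remaining big hmem (by simp [pvInside_refl])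
      -- the invariant survives one step
      have hinv' : ∀ z ∈ remaining.filter (fun b => !(pvInside big b)),
          pvIsNested (result ++ [big]) z = false := by
        intro z hz
        have hzr : z ∈ remaining := List.mem_of_mem_filter hz
        have hq : pvInside big z = false := by
          have := List.of_mem_filter hz
          simpa using this
        rw [pvIsNested_append]
        simp [hinv z hzr, pvIsNested, hq]
      rw [ih _ _ (Nat.le_of_lt_succ (Nat.lt_of_lt_of_le hlt hlen)) hinv']
      -- the sorted remaining list starts with big
      have hhead : (PySem.List.sorted remaining pvArea true).head? = some big := by
        rw [pvHead_sorted_eq_max?]; exact heq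
      obtain ⟨tail, htail⟩ : ∃ t, PySem.List.sorted remaining pvArea true = big :: t := by
        cases hs : PySem.List.sorted remaining pvArea true with
        | nil => rw [hs] at hhead; cases hhead
        | cons a t =>
          rw [hs] at hhead
          simp only [List.head?_cons, Option.some.injEq] at hhead
          exact ⟨t, by rw [hhead]⟩
      rw [← pvFilter_sorted, htail]
      simp only [List.filter_cons, pvInside_refl, Bool.not_true, Bool.false_eq_true, if_false,
        List.foldl_cons]
      rw [if_neg (by rw [hinv big hmem]; simp)]
      exact (pvSkip big tail (result ++ [big]) (List.mem_append_right _ (by simp))).symm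

-- ===== VERDICT (by name: the statement is the Claim_ definition above) =====
theorem merge_nested_boxes_spec : Claim_equal_merge_nested_boxes := by
  intro boxes _
  unfold Spec_merge_nested_boxes merge_nested_boxes merge_nested_boxes_alt
  rw [pvSelectLoop_eq_foldA boxes.length boxes [] (Nat.le_refl _) (by intro z _; rfl)]
  split
  · rename_i h
    match boxes, h with
    | [], _ => rfl
    | [b], _ => simp [PySem.List.sorted, PySem.List.insertBy, pvIsNested]
    | a :: b :: t, h => simp at h
  · rfl
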